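-- pv_equiv track=rewrite | github.com/tom9744/Algorithms | BOJ/완전 탐색/연구소.py | DFS
-- ===== SOURCE A (Python) =====
-- def DFS(coordinates, count, path, index=0):
--     if count == 0:
--         return [path[:]]
--
--     result = []
--
--     for idx in range(index, len(coordinates)):
--         path.append(coordinates[idx])
--         result.extend(DFS(coordinates, count - 1, path, idx + 1))
--         path.pop()
--
--     return result
-- ===== SOURCE B (Python) =====
-- def DFS(coordinates, count, path, index=0):
--     if count < 0:
--         return []
--     combos = [[]]
--     remaining = count
--     while remaining > 0:
--         combos = [c + [j] for c in combos
--                   for j in range((c[-1] + 1) if c else index, len(coordinates))]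
--         if not combos:
--             return []
--         remaining -= 1
--     return [path + [coordinates[j] for j in c] for c in combos]
-- ===== Notes on version B (the rewrite author's own statement) =====
-- stated objective: alternative
-- what changed: Replaced A's recursive depth-first search with an iterative breadth-first level-by-level construction: a loop that extends every partial index-combination by one more index per round, followed by a final pass that materialises the coordinate paths.
import Mathlib
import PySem

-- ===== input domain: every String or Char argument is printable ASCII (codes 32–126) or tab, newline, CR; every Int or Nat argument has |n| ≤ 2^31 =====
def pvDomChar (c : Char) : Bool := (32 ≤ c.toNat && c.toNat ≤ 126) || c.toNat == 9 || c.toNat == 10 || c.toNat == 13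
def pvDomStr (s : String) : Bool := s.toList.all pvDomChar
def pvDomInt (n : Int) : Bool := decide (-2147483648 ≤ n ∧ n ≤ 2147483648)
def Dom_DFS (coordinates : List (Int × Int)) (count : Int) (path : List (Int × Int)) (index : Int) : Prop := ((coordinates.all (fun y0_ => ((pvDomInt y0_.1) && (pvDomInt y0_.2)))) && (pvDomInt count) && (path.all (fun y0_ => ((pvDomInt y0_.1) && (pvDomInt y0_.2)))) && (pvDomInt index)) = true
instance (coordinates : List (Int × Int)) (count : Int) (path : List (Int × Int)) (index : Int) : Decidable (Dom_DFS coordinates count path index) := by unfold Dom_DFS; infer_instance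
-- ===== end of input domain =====

-- B replaces A's recursive DFS by an iterative level-by-level (breadth-first) construction of the
-- index combinations, materialising the coordinate paths only in a final pass (alternative decomposition,
-- same cost). A mutates `path` (append then pop, net effect none); B does not mutate; the equivalence
-- proved here is about the return value.

-- ===== PORT A =====
-- the for-loop "for idx in range(index, len)" collecting result.extend(...) is the flatten of
-- the map over pyRange; .attach only carries the membership proof used for termination.
def DFS (coordinates : List (Int × Int)) (count : Int) (path : List (Int × Int)) (index : Int) : List (List (Int × Int)) :=
  if count = 0 then [path]
  else
    ((PySem.List.pyRange index (coordinates.length : Int) 1).attach.map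
      (fun x => DFS coordinates (count - 1) (path ++ [PySem.List.pyGetD coordinates x.1 (0, 0)]) (x.1 + 1))).flatten
termination_by ((coordinates.length : Int) - index).toNat
decreasing_by
  have h := (PySem.List.mem_pyRange_one.mp x.2)
  omega

-- ===== PORT B =====
-- one level of Source B's while-loop: the comprehension
-- [c + [j] for c in combos for j in range((c[-1] + 1) if c else index, len(coordinates))]
def DFS_alt_step (coordinates : List (Int × Int)) (index : Int) (combos : List (List Int)) : List (List Int) :=
  combos.flatMap (fun c =>
    (PySem.List.pyRange (if c = [] then index else PySem.List.pyGetD c (-1) 0 + 1)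
        (coordinates.length : Int) 1).map (fun j => c ++ [j]))

-- the while-loop with its early 'return []', then the final materialising comprehension
def DFS_alt_loop (coordinates : List (Int × Int)) (path : List (Int × Int)) (index : Int)
    (combos : List (List Int)) (remaining : Int) : List (List (Int × Int)) :=
  if 0 < remaining then
    let combos' := DFS_alt_step coordinates index combos
    if combos' = [] then []
    else DFS_alt_loop coordinates path index combos' (remaining - 1)
  else
    combos.map (fun c => path ++ c.map (fun j => PySem.List.pyGetD coordinates j (0, 0)))
termination_by remaining.toNat
decreasing_by omega

def DFS_alt (coordinates : List (Int × Int)) (count : Int) (path : List (Int × Int)) (index : Int) : List (List (Int × Int)) :=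
  if count < 0 then []
  else DFS_alt_loop coordinates path index [[]] count

-- ===== PRECONDITION & SPEC =====
-- Pre_ excludes exactly the inputs where Python A raises IndexError (count ≠ 0 and index < -len(coordinates),
-- so coordinates[idx] is out of range on the first loop iteration).
def Pre_DFS (coordinates : List (Int × Int)) (count : Int) (path : List (Int × Int)) (index : Int) : Prop :=
  count = 0 ∨ -(coordinates.length : Int) ≤ index
instance (coordinates : List (Int × Int)) (count : Int) (path : List (Int × Int)) (index : Int) : Decidable (Pre_DFS coordinates count path index) := by unfold Pre_DFS; infer_instance

def pvWitness_DFS : (List (Int × Int)) × Int × (List (Int × Int)) × Int := ([(0, 1), (2, 3), (4, 5)], 2, [], 0)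

def Spec_DFS (coordinates : List (Int × Int)) (count : Int) (path : List (Int × Int)) (index : Int) (out : List (List (Int × Int))) : Prop := out = DFS_alt coordinates count path index
instance (coordinates : List (Int × Int)) (count : Int) (path : List (Int × Int)) (index : Int) (out : List (List (Int × Int))) : Decidable (Spec_DFS coordinates count path index out) := by unfold Spec_DFS; infer_instance

-- ===== CLAIM (what is proved, stated in full; the proofs are below) =====
def Claim_equal_DFS : Prop := ∀ (coordinates : List (Int × Int)) (count : Int) (path : List (Int × Int)) (index : Int), Dom_DFS coordinates count path index → Pre_DFS coordinates count path index → Spec_DFS coordinates count path index (DFS coordinates count path index)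

-- ===== LEMMAS AND PROOFS =====

-- attach-free unfolding of port A
theorem DFS_eq (coordinates : List (Int × Int)) (count : Int) (path : List (Int × Int)) (index : Int) :
    DFS coordinates count path index =
      if count = 0 then [path]
      else
        ((PySem.List.pyRange index (coordinates.length : Int) 1).map
          (fun idx => DFS coordinates (count - 1) (path ++ [PySem.List.pyGetD coordinates idx (0, 0)]) (idx + 1))).flatten := by
  rw [DFS]
  split_ifs with h
  · rfl
  · rw [List.map_attach_eq_pmap]
    simp

-- A returns [] for negative count (the loop only ever runs index up to len and count never reaches 0)
theorem DFS_neg (coordinates : List (Int × Int)) : ∀ (n : Nat) (count : Int) (path : List (Int × Int)) (index : Int),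
    ((coordinates.length : Int) - index).toNat ≤ n → count < 0 →
    DFS coordinates count path index = [] := by
  intro n
  induction n with
  | zero =>
    intro count path index hn hc
    rw [DFS_eq, if_neg (by omega), PySem.List.pyRange_one_eq_nil (by omega)]
    simp
  | succ n ih =>
    intro count path index hn hc
    rw [DFS_eq, if_neg (by omega)]
    simp only [List.flatten_eq_nil_iff, List.mem_map]
    rintro _ ⟨idx, hidx, rfl⟩
    have hb := PySem.List.mem_pyRange_one.mp hidx
    exact ih (count - 1) _ (idx + 1) (by omega) (by omega)

-- the 'next start index' of a partial index-combination, as Source B computes it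
theorem next_append (c : List Int) (j index : Int) :
    (if c ++ [j] = [] then index else PySem.List.pyGetD (c ++ [j]) (-1) 0 + 1) = j + 1 := by
  rw [if_neg (by simp), PySem.List.pyGetD_neg_one_append_singleton]

-- loop invariant: running B's loop for r more rounds from the partial combinations C computes
-- the flatten, over C, of what A computes with count r starting after each partial combination.
-- one round of Source B's loop corresponds, on the A side, to peeling one unit off count:
-- extending every partial combination by one index and calling A with count n equals calling A with count n+1.
theorem step_flatten (coordinates : List (Int × Int)) (path : List (Int × Int)) (index : Int) (n : Nat) :
    ∀ (C : List (List Int)),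
    ((DFS_alt_step coordinates index C).map (fun c =>
        DFS coordinates (n : Int)
          (path ++ c.map (fun j => PySem.List.pyGetD coordinates j (0, 0)))
          (if c = [] then index else PySem.List.pyGetD c (-1) 0 + 1))).flatten
    = (C.map (fun c =>
        DFS coordinates ((n : Int) + 1)
          (path ++ c.map (fun j => PySem.List.pyGetD coordinates j (0, 0)))
          (if c = [] then index else PySem.List.pyGetD c (-1) 0 + 1))).flatten := by
  intro C
  induction C with
  | nil => simp [DFS_alt_step]
  | cons c C ihC =>
    rw [show DFS_alt_step coordinates index (c :: C) =
        ((PySem.List.pyRange (if c = [] then index else PySem.List.pyGetD c (-1) 0 + 1)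
            (coordinates.length : Int) 1).map (fun j => c ++ [j])) ++ DFS_alt_step coordinates index C
      from by simp [DFS_alt_step]]
    rw [List.map_append, List.flatten_append, ihC]
    simp only [List.map_cons, List.flatten_cons]
    congr 1
    rw [DFS_eq coordinates ((n : Int) + 1)]
    rw [if_neg (show ¬((n : Int) + 1 = 0) from by omega)]
    rw [show (n : Int) + 1 - 1 = (n : Int) from by ring]
    apply congrArg List.flatten
    rw [List.map_map]
    refine List.map_congr_left ?_
    intro j hj
    simp only [Function.comp_apply]
    rw [next_append, List.map_append, ← List.append_assoc]
    simp

-- loop invariant: running B's loop for r more rounds from the partial combinations C computes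
-- the flatten, over C, of what A computes with count r starting after each partial combination.
theorem loop_inv (coordinates : List (Int × Int)) (path : List (Int × Int)) (index : Int) :
    ∀ (n : Nat) (C : List (List Int)),
    DFS_alt_loop coordinates path index C (n : Int) =
      (C.map (fun c =>
        DFS coordinates (n : Int)
          (path ++ c.map (fun j => PySem.List.pyGetD coordinates j (0, 0)))
          (if c = [] then index else PySem.List.pyGetD c (-1) 0 + 1))).flatten := by
  intro n
  induction n with
  | zero =>
    intro C
    rw [DFS_alt_loop, if_neg (by omega)]
    induction C with
    | nil => simp
    | cons c C ihC =>
      have hg : DFS coordinates ((0 : Nat) : Int)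
          (path ++ c.map (fun j => PySem.List.pyGetD coordinates j (0, 0)))
          (if c = [] then index else PySem.List.pyGetD c (-1) 0 + 1) =
          [path ++ c.map (fun j => PySem.List.pyGetD coordinates j (0, 0))] := by
        rw [DFS_eq]; norm_num
      simp only [List.map_cons, List.flatten_cons, hg, List.singleton_append]
      rw [ihC]
  | succ n ih =>
    intro C
    have hc : ((n + 1 : Nat) : Int) = (n : Int) + 1 := by push_cast; ring
    rw [hc, DFS_alt_loop, if_pos (by omega)]
    have h1 : (n : Int) + 1 - 1 = (n : Int) := by ring
    simp only [h1]
    split_ifs with hnil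
    · -- early return []: every range was empty, so every A-call on the right is [] too
      symm
      simp only [List.flatten_eq_nil_iff, List.mem_map]
      rintro _ ⟨c, hc', rfl⟩
      rw [DFS_eq, if_neg (by omega)]
      have hrange : PySem.List.pyRange (if c = [] then index else PySem.List.pyGetD c (-1) 0 + 1)
          (coordinates.length : Int) 1 = [] := by
        have := List.flatMap_eq_nil_iff.mp hnil c hc'
        simpa using this
      rw [hrange]; simp
    · rw [ih, step_flatten]

-- ===== VERDICT (by name: the statement is the Claim_ definition above) =====
theorem DFS_spec : Claim_equal_DFS := by
  intro coordinates count path index _ _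
  unfold Spec_DFS DFS_alt
  split_ifs with hneg
  · exact DFS_neg coordinates ((coordinates.length : Int) - index).toNat count path index le_rfl hneg
  · have hcnt : count = ((count.toNat : Nat) : Int) := by omega
    rw [hcnt, loop_inv]
    simp [← hcnt]
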